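-- pv_equiv track=rewrite | github.com/sktime/sktime | sktime/detection/wclust.py | _overlap_final_label
-- ===== SOURCE A (Python) =====
-- def _overlap_final_label(labels, window_size, step_size, X):
--     time_point_labels = [[] for _ in range(len(X))]
--
--     for i in range(len(labels)):
--         start_ind = i * step_size
--         end_ind = start_ind + window_size
--         if end_ind > len(X):
--             end_ind = len(X)
--         for j in range(start_ind, end_ind):
--             time_point_labels[j].append(int(labels[i]))
--     return time_point_labels
-- ===== SOURCE B (Python) =====
-- def _overlap_final_label(labels, window_size, step_size, X):
--     n = len(X)
--     m = len(labels)
--     out = []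
--     for j in range(n):
--         if step_size == 0:
--             out.append([int(l) for l in labels] if j < window_size else [])
--         else:
--             lo = max(0, (j - window_size) // step_size + 1)
--             hi = min(m - 1, j // step_size)
--             out.append([int(labels[i]) for i in range(lo, hi + 1)])
--     return out
-- ===== Notes on version B (the rewrite author's own statement) =====
-- stated objective: alternative
-- what changed: B inverts the traversal: instead of iterating windows and appending into a mutable table, it builds each time point's label list directly from the closed-form interval of covering window indices (floor-division bounds), with a separate branch for step_size == 0.
-- outside the precondition, e.g. on _overlap_final_label([1, 2], 2, -1, [5, 5, 5]): A returns [[1, 2], [1], [2]], B returns [[], [], []]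
import Mathlib
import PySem

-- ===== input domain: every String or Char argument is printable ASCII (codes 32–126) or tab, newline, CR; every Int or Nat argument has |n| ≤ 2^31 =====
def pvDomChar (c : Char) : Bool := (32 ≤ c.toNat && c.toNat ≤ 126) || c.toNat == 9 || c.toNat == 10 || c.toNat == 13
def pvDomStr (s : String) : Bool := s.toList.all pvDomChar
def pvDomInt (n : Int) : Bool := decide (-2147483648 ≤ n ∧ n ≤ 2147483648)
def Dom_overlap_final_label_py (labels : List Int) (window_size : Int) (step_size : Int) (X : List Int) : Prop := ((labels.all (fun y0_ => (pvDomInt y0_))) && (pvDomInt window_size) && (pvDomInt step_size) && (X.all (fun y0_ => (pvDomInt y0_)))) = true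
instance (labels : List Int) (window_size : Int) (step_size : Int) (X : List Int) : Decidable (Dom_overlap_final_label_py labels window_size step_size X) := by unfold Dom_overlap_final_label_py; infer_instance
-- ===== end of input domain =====

-- B builds each time point's label list directly from the closed-form interval of covering
-- window indices, instead of A's window-by-window appending into a mutable table (alternative
-- decomposition, same cost class). Equivalence is claimed for step_size >= 0.


-- ===== PORT A =====
-- time_point_labels[j].append(v): Python resolves j (negative wraps) and mutates that cell;
-- an out-of-range j is an IndexError (excluded by Pre_), modelled here as a no-op.
def appendAtA (tpl : List (List Int)) (j : Int) (v : Int) : List (List Int) :=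
  match PySem.List.pyGet? tpl j with
  | none => tpl
  | some cell => PySem.List.pySetD tpl j (cell ++ [v])

-- one iteration of A's outer loop (body of 'for i in range(len(labels))')
def stepA (labels : List Int) (window_size : Int) (step_size : Int) (nX : Nat)
    (tpl : List (List Int)) (i : Nat) : List (List Int) :=
  let start_ind := (i : Int) * step_size
  let end_ind0 := start_ind + window_size
  let end_ind := if end_ind0 > (nX : Int) then (nX : Int) else end_ind0
  (PySem.List.pyRange start_ind end_ind 1).foldl
    (fun t j => appendAtA t j (labels.getD i 0)) tpl

def overlap_final_label_py (labels : List Int) (window_size : Int) (step_size : Int) (X : List Int) : List (List Int) :=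
  (List.range labels.length).foldl (stepA labels window_size step_size X.length)
    (X.map (fun _ => ([] : List Int)))

-- ===== PORT B =====
-- the list built for time point j (body of B's loop over j)
def cellB (labels : List Int) (window_size : Int) (step_size : Int) (j : Nat) : List Int :=
  if step_size = 0 then
    (if (j : Int) < window_size then labels.map (fun l => l) else [])
  else
    let lo := max 0 (PySem.Int.floordiv ((j : Int) - window_size) step_size + 1)
    let hi := min ((labels.length : Int) - 1) (PySem.Int.floordiv (j : Int) step_size)
    (PySem.List.pyRange lo (hi + 1) 1).map (fun i => PySem.List.pyGetD labels i 0)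

def overlap_final_label_py_alt (labels : List Int) (window_size : Int) (step_size : Int) (X : List Int) : List (List Int) :=
  (List.range X.length).map (cellB labels window_size step_size)

-- ===== PRECONDITION & SPEC =====
-- Pre_ restricts to the function's natural domain step_size ≥ 0 (sktime's step sizes are
-- positive): for negative step_size A's window starts go negative, where A either raises
-- IndexError or appends through Python's negative-index wraparound — an accident of the
-- mutable-table implementation, not window coverage.
def Pre_overlap_final_label_py (labels : List Int) (window_size : Int) (step_size : Int) (X : List Int) : Prop :=
  0 ≤ step_size
instance (labels : List Int) (window_size : Int) (step_size : Int) (X : List Int) : Decidable (Pre_overlap_final_label_py labels window_size step_size X) := by unfold Pre_overlap_final_label_py; infer_instance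

def pvWitness_overlap_final_label_py : List Int × Int × Int × List Int := ([1, 2], 2, 1, [0, 0, 0])

def Spec_overlap_final_label_py (labels : List Int) (window_size : Int) (step_size : Int) (X : List Int) (out : List (List Int)) : Prop := out = overlap_final_label_py_alt labels window_size step_size X
instance (labels : List Int) (window_size : Int) (step_size : Int) (X : List Int) (out : List (List Int)) : Decidable (Spec_overlap_final_label_py labels window_size step_size X out) := by unfold Spec_overlap_final_label_py; infer_instance

-- ===== CLAIM (what is proved, stated in full; the proofs are below) =====
def Claim_equal_overlap_final_label_py : Prop := ∀ (labels : List Int) (window_size : Int) (step_size : Int) (X : List Int), Dom_overlap_final_label_py labels window_size step_size X → Pre_overlap_final_label_py labels window_size step_size X → Spec_overlap_final_label_py labels window_size step_size X (overlap_final_label_py labels window_size step_size X)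

-- ===== LEMMAS AND PROOFS =====

-- the reference value of cell k: labels of the windows i covering time point k, in window order
def refCell (labels : List Int) (window_size : Int) (step_size : Int) (k : Nat) : List Int :=
  ((List.range labels.length).filter
      (fun (i : Nat) => decide ((i : Int) * step_size ≤ (k : Int) ∧ (k : Int) < (i : Int) * step_size + window_size))).map
    (fun i => labels.getD i 0)

lemma inner_fold (v : Int) (n : Nat) :
    ∀ (d : Nat) (a b : Int) (tpl : List (List Int)), (b - a).toNat = d →
      tpl.length = n → 0 ≤ a → b ≤ (n : Int) →
      (((PySem.List.pyRange a b 1).foldl (fun t j => appendAtA t j v) tpl).length = n ∧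
       ∀ k : Nat, k < n →
         ((PySem.List.pyRange a b 1).foldl (fun t j => appendAtA t j v) tpl).getD k [] =
           tpl.getD k [] ++ (if a ≤ (k : Int) ∧ (k : Int) < b then [v] else [])) := by
  intro d
  induction d with
  | zero =>
    intro a b tpl hd hlen ha hb
    rw [PySem.List.pyRange_one_eq_nil (by omega)]
    simp only [List.foldl_nil]
    refine ⟨hlen, fun k hk => ?_⟩
    rw [if_neg (by omega)]
    simp
  | succ d ih =>
    intro a b tpl hd hlen ha hb
    have hab : a < b := by omega
    rw [PySem.List.pyRange_one_cons hab]
    simp only [List.foldl_cons]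
    have haN : a.toNat < tpl.length := by omega
    have hset : appendAtA tpl a v = tpl.set a.toNat (tpl[a.toNat]'haN ++ [v]) := by
      unfold appendAtA
      rw [show PySem.List.pyGet? tpl a = some (tpl[a.toNat]'haN) from PySem.List.pyGet?_eq_some_getElem tpl ha (by omega)]
      exact PySem.List.pySetD_of_nonneg _ _ ha
    rw [hset]
    have := ih (a+1) b (tpl.set a.toNat (tpl[a.toNat]'haN ++ [v])) (by omega)
      (by simp [hlen]) (by omega) hb
    refine ⟨this.1, fun k hk => ?_⟩
    rw [this.2 k hk]
    have hgetset : (tpl.set a.toNat (tpl[a.toNat]'haN ++ [v])).getD k [] =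
        if k = a.toNat then tpl[a.toNat]'haN ++ [v] else tpl.getD k [] := by
      simp only [List.getD_eq_getElem?_getD, List.getElem?_set]
      rcases eq_or_ne k a.toNat with h | h
      · simp [h, haN]
      · rw [if_neg h]
        simp [Ne.symm h]
    rw [hgetset]
    by_cases h : k = a.toNat
    · subst h
      rw [if_pos rfl, if_neg (by omega),
        if_pos (show a ≤ (a.toNat : Int) ∧ (a.toNat : Int) < b by omega)]
      simp [List.getD_eq_getElem?_getD, List.getElem?_eq_getElem haN]
    · rw [if_neg h]
      have : ((k:Int) = a) ↔ k = a.toNat := by omega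
      by_cases h2 : a + 1 ≤ (k:Int) ∧ (k:Int) < b
      · rw [if_pos h2, if_pos (by omega)]
      · rw [if_neg h2, if_neg (by omega)]

lemma outer_fold (labels : List Int) (ws ss : Int) (hss : 0 ≤ ss) (n : Nat) :
    ∀ (is : List Nat) (tpl : List (List Int)), tpl.length = n →
      ((is.foldl (stepA labels ws ss n) tpl).length = n ∧
       ∀ k : Nat, k < n →
         (is.foldl (stepA labels ws ss n) tpl).getD k [] =
           tpl.getD k [] ++
             (is.filter (fun (i : Nat) => decide ((i : Int) * ss ≤ (k : Int) ∧ (k : Int) < (i : Int) * ss + ws))).map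
               (fun i => labels.getD i 0)) := by
  intro is
  induction is with
  | nil => intro tpl hlen; exact ⟨hlen, fun k _ => by simp⟩
  | cons i is ih =>
    intro tpl hlen
    simp only [List.foldl_cons]
    have ha : (0:Int) ≤ (i : Int) * ss := mul_nonneg (by positivity) hss
    have hinner := inner_fold (labels.getD i 0) n
      ((if ((i:Int)*ss + ws) > (n:Int) then (n:Int) else (i:Int)*ss + ws) - (i:Int)*ss).toNat
      ((i:Int)*ss) (if ((i:Int)*ss + ws) > (n:Int) then (n:Int) else (i:Int)*ss + ws)
      tpl rfl hlen ha (by split <;> omega)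
    have hstep : stepA labels ws ss n tpl i =
        (PySem.List.pyRange ((i:Int)*ss)
          (if ((i:Int)*ss + ws) > (n:Int) then (n:Int) else (i:Int)*ss + ws) 1).foldl
          (fun t j => appendAtA t j (labels.getD i 0)) tpl := rfl
    have h2 := ih (stepA labels ws ss n tpl i) (hstep ▸ hinner.1)
    refine ⟨h2.1, fun k hk => ?_⟩
    rw [h2.2 k hk, hstep, hinner.2 k hk]
    rw [List.filter_cons]
    have hiff : ((i:Int)*ss ≤ (k:Int) ∧ (k:Int) < (if ((i:Int)*ss + ws) > (n:Int) then (n:Int) else (i:Int)*ss + ws))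
        ↔ ((i:Int)*ss ≤ (k:Int) ∧ (k:Int) < (i:Int)*ss + ws) := by
      constructor <;> intro hc <;> refine ⟨hc.1, ?_⟩ <;> have := hc.2 <;> split_ifs at * <;> omega
    by_cases hc : (i:Int)*ss ≤ (k:Int) ∧ (k:Int) < (i:Int)*ss + ws
    · rw [if_pos (hiff.mpr hc), if_pos (by simpa using hc)]
      simp
    · rw [if_neg (fun hcc => hc (hiff.mp hcc)), if_neg (by simpa using hc)]
      simp

lemma map_getD_range (labels : List Int) :
    (List.range labels.length).map (fun i => labels.getD i 0) = labels := by
  apply List.ext_getElem <;> simp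
  intro i h1 h2
  simp [List.getElem?_eq_getElem h1]

lemma cellB_eq_refCell (labels : List Int) (ws ss : Int) (hss : 0 ≤ ss) (k : Nat) :
    cellB labels ws ss k = refCell labels ws ss k := by
  unfold cellB refCell
  by_cases h0 : ss = 0
  · subst h0
    rw [if_pos rfl]
    by_cases hkw : (k : Int) < ws
    · rw [if_pos hkw]
      have : (List.range labels.length).filter
          (fun (i : Nat) => decide ((i : Int) * 0 ≤ (k : Int) ∧ (k : Int) < (i : Int) * 0 + ws)) =
          List.range labels.length := by
        apply List.filter_eq_self.mpr
        intro i _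
        simp [hkw]
      rw [this, map_getD_range]
      simp
    · rw [if_neg hkw]
      have : (List.range labels.length).filter
          (fun (i : Nat) => decide ((i : Int) * 0 ≤ (k : Int) ∧ (k : Int) < (i : Int) * 0 + ws)) = [] := by
        apply List.filter_eq_nil_iff.mpr
        intro i _
        simp [hkw]
      rw [this]
      simp
  · have hpos : 0 < ss := lt_of_le_of_ne hss (Ne.symm h0)
    rw [if_neg h0]
    have hle : ∀ x : Int, (x ≤ PySem.Int.floordiv (k : Int) ss ↔ x * ss ≤ (k : Int)) :=
      fun x => PySem.Int.le_floordiv_iff_mul_le hpos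
    have hlt : ∀ x : Int, (PySem.Int.floordiv ((k : Int) - ws) ss < x ↔ (k : Int) - ws < x * ss) :=
      fun x => PySem.Int.floordiv_lt_iff_lt_mul hpos
    have hrange : PySem.List.pyRange (max 0 (PySem.Int.floordiv ((k : Int) - ws) ss + 1))
        (min ((labels.length : Int) - 1) (PySem.Int.floordiv (k : Int) ss) + 1) 1 =
        ((List.range labels.length).filter
          (fun (i : Nat) => decide ((i : Int) * ss ≤ (k : Int) ∧ (k : Int) < (i : Int) * ss + ws))).map
          (Nat.cast : Nat → Int) := by
      apply List.eq_of_perm_of_sorted (le := (· < ·)) (fun a b _ _ h1 h2 => absurd h2 (by omega))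
      · exact PySem.List.pairwise_lt_pyRange_one _ _
      · exact List.Pairwise.map _ (fun a b h => by exact_mod_cast h)
          ((List.pairwise_lt_range).filter _)
      · apply (List.perm_ext_iff_of_nodup (PySem.List.nodup_pyRange_one _ _)
          (((List.nodup_range).filter _).map Nat.cast_injective)).mpr
        intro x
        rw [PySem.List.mem_pyRange_one]
        simp only [List.mem_map, List.mem_filter, List.mem_range, decide_eq_true_eq]
        constructor
        · rintro ⟨hx1, hx2⟩
          have hx0 : 0 ≤ x := le_trans (le_max_left _ _) hx1
          have h1 : x * ss ≤ (k : Int) := (hle x).mp (by omega)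
          have h2 : (k : Int) - ws < x * ss := (hlt x).mp (by omega)
          have htn : ((x.toNat : Int)) = x := Int.toNat_of_nonneg hx0
          refine ⟨x.toNat, ⟨?_, ?_, ?_⟩, htn⟩
          · omega
          · rw [htn]; exact h1
          · rw [htn]; omega
        · rintro ⟨i, ⟨him, hc1, hc2⟩, rfl⟩
          have e1 : (i : Int) ≤ PySem.Int.floordiv (k : Int) ss := (hle (i : Int)).mpr hc1
          have e2 : PySem.Int.floordiv ((k : Int) - ws) ss < (i : Int) := (hlt (i : Int)).mpr (by omega)
          omega
    dsimp only
    rw [hrange, List.map_map]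
    simp

-- ===== VERDICT (by name: the statement is the Claim_ definition above) =====
theorem overlap_final_label_py_spec : Claim_equal_overlap_final_label_py := by
  intro labels ws ss X _hdom hpre
  unfold Spec_overlap_final_label_py
  have hss : 0 ≤ ss := hpre
  unfold overlap_final_label_py overlap_final_label_py_alt
  have h := outer_fold labels ws ss hss X.length (List.range labels.length)
      (X.map (fun _ => ([] : List Int))) (by simp)
  apply List.ext_getElem
  · rw [List.length_map, List.length_range]; exact h.1
  · intro k hk1 hk2
    have hkn : k < X.length := by simpa using hk2
    have hA : ((List.range labels.length).foldl (stepA labels ws ss X.length)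
        (X.map (fun _ => ([] : List Int)))).getD k [] = refCell labels ws ss k := by
      rw [h.2 k hkn]
      have : (X.map (fun _ => ([] : List Int))).getD k [] = [] := by
        rcases (X.map (fun _ => ([] : List Int)))[k]?.eq_none_or_eq_some with h' | ⟨c, h'⟩ <;>
          simp_all [List.getD_eq_getElem?_getD]
      rw [this, List.nil_append, refCell]
    rw [← List.getD_eq_getElem _ [] , hA, List.getElem_map, List.getElem_range,
      cellB_eq_refCell labels ws ss hss k]
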